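-- pv_equiv track=rewrite | github.com/sagorgit/pythonLab6 | binary_tree_step1.py | build_tree_recursive
-- ===== SOURCE A (Python) =====
-- from typing import Dict, List, Any
--
-- def left_child_variant_14(value: int) -> int:
--     """
--     Возвращает значение левого потомка для варианта №14.
--
--     Правило: left = 2 - (value - 1) = 3 - value.
--     """
--     return 3 - value
--
-- def right_child_variant_14(value: int) -> int:
--     """
--     Возвращает значение правого потомка для варианта №14.
--
--     Правило: right = value * 2.
--     """
--     return value * 2
--
-- def build_tree_recursive(data: Dict[str, Any]) -> List[List[int]]:
--     """
--     Построение бинарного дерева рекурсивным способом для варианта №14.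
--
--     Параметры:
--         data: словарь с ключами:
--             - "root": значение в корневом узле (int)
--             - "height": высота дерева (int), где корень — это уровень 1.
--
--     Возвращает:
--         Список уровней дерева (List[List[int]]), где levels[i] — это
--         список значений узлов на уровне i (начиная с i=0 для корня).
--
--     Замечания:
--         - Здесь дерево представлено как список уровней для наглядности.
--         - Для каждого узла вычисляются левый и правый потомки по правилам
--           варианта №14.
--     """
--     root: int = int(data["root"])
--     height: int = int(data["height"])
--
--     # levels[0] = [root]
--     levels: List[List[int]] = [[root]]
--
--     def expand(level_index: int, current_level_nodes: List[int]) -> None: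
--         # Базовый случай: если достигли требуемой высоты, завершаем.
--         # У нас levels[0] — это уровень 1 (корень), значит
--         # всего должно быть height уровней -> индекс последнего = height - 1.
--         if level_index == height - 1:
--             return
--
--         next_level: List[int] = []
--         for val in current_level_nodes:
--             left = left_child_variant_14(val)
--             right = right_child_variant_14(val)
--             next_level.extend([left, right])
--
--         levels.append(next_level)
--         expand(level_index + 1, next_level)
--
--     expand(0, [root])
--     return levels
-- ===== SOURCE B (Python) =====
-- def build_tree_recursive(data):
--     root = int(data["root"])
--     height = int(data["height"])
--     levels = [[root]]
--     cur = [root]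
--     for _ in range(height - 1):
--         cur = [c for v in cur for c in (3 - v, v * 2)]
--         levels.append(cur)
--     return levels
-- ===== Notes on version B (the rewrite author's own statement) =====
-- stated objective: simpler
-- what changed: Replaces A's inner recursive expand() closure that tracks a level index and extends an outer levels list with a plain for-loop over range(height-1) building each next level by a flat comprehension.
import Mathlib
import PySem

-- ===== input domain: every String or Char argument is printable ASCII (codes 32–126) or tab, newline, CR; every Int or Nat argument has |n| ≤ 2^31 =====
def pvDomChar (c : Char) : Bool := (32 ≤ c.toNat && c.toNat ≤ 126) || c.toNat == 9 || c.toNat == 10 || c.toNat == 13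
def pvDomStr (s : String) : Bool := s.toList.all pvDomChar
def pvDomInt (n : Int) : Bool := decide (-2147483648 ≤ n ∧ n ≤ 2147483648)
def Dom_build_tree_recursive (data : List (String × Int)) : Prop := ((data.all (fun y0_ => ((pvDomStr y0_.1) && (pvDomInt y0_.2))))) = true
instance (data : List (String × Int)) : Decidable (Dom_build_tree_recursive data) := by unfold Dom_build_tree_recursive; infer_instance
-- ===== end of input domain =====

-- B replaces A's recursive expand() closure by a plain for-loop with a flat comprehension (objective: simpler).


-- ===== PORT A =====
-- A's inner recursive `expand(level_index, current_level_nodes)` mutating `levels`;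
-- here `levels` is threaded as an explicit accumulator. The `else levels` branch of
-- the `level_index < height - 1` totality guard corresponds to inputs (height ≤ 0)
-- on which the Python diverges; those are outside Pre_.
def pvExpandA (height : Int) (level_index : Int) (current_level_nodes : List Int)
    (levels : List (List Int)) : List (List Int) :=
  if level_index = height - 1 then levels
  else if _h : level_index < height - 1 then
    let next_level : List Int :=
      current_level_nodes.foldl (fun acc val => acc ++ [3 - val, val * 2]) []
    pvExpandA height (level_index + 1) next_level (levels ++ [next_level])
  else levels
termination_by (height - 1 - level_index).toNat
decreasing_by omega

def build_tree_recursive (data : List (String × Int)) : List (List Int) :=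
  let d := PySem.Dict.ofList data
  match d.get? "root", d.get? "height" with
  | some root, some height => pvExpandA height 0 [root] [[root]]
  | _, _ => []  -- KeyError in Python; outside Pre_

-- ===== PORT B =====
def build_tree_recursive_alt (data : List (String × Int)) : List (List Int) :=
  let d := PySem.Dict.ofList data
  match d.get? "root" with
  | none => []  -- KeyError in Python; outside Pre_
  | some root =>
    match d.get? "height" with
    | none => []  -- KeyError in Python; outside Pre_
    | some height =>
      ((List.range (height - 1).toNat).foldl
        (fun (st : List (List Int) × List Int) _ =>
          let cur := st.2.flatMap (fun v => [3 - v, v * 2])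
          (st.1 ++ [cur], cur))
        ([[root]], [root])).1

-- ===== PRECONDITION & SPEC =====
-- Pre_ excludes inputs where the Python A does not return: a missing "root"/"height"
-- key (KeyError) and height ≤ 0 (the recursion's stop index is never reached: A diverges).
def Pre_build_tree_recursive (data : List (String × Int)) : Prop :=
  ((PySem.Dict.ofList data).get? "root").isSome = true ∧
  1 ≤ ((PySem.Dict.ofList data).get? "height").getD 0
instance (data : List (String × Int)) : Decidable (Pre_build_tree_recursive data) := by
  unfold Pre_build_tree_recursive; infer_instance

def pvWitness_build_tree_recursive : (List (String × Int)) := [("root", 5), ("height", 3)]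

def Spec_build_tree_recursive (data : List (String × Int)) (out : List (List Int)) : Prop :=
  out = build_tree_recursive_alt data
instance (data : List (String × Int)) (out : List (List Int)) :
    Decidable (Spec_build_tree_recursive data out) := by
  unfold Spec_build_tree_recursive; infer_instance

-- ===== CLAIM (what is proved, stated in full; the proofs are below) =====
def Claim_equal_build_tree_recursive : Prop :=
  ∀ (data : List (String × Int)), Dom_build_tree_recursive data →
    Pre_build_tree_recursive data →
    Spec_build_tree_recursive data (build_tree_recursive data)

-- ===== LEMMAS AND PROOFS =====

def pvStepB (st : List (List Int) × List Int) (_i : Nat) : List (List Int) × List Int :=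
  let cur := st.2.flatMap (fun v => [3 - v, v * 2])
  (st.1 ++ [cur], cur)

lemma pvExpandA_eq_foldl (k : Nat) :
    ∀ (height level_index : Int) (cur : List Int) (levels : List (List Int)),
      level_index = height - 1 - (k : Int) →
      pvExpandA height level_index cur levels
        = ((List.range k).foldl pvStepB (levels, cur)).1 := by
  induction k with
  | zero =>
      intro height li cur levels h
      rw [pvExpandA]
      simp [h]
  | succ k ih =>
      intro height li cur levels h
      rw [pvExpandA]
      have h1 : ¬ li = height - 1 := by omega
      have h2 : li < height - 1 := by omega
      rw [if_neg h1, dif_pos h2]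
      rw [List.range_succ_eq_map, List.foldl_cons, List.foldl_map]
      have hnext : cur.foldl (fun acc val => acc ++ [3 - val, val * 2]) []
          = cur.flatMap (fun v => [3 - v, v * 2]) := by
        simpa using PySem.List.foldl_append_eq_flatMap (fun v => [3 - v, v * 2]) (l := cur) (acc := [])
      rw [hnext]
      have := ih height (li + 1)
        (cur.flatMap (fun v => [3 - v, v * 2]))
        (levels ++ [cur.flatMap (fun v => [3 - v, v * 2])]) (by omega)
      rw [this]
      rfl

-- ===== VERDICT (by name: the statement is the Claim_ definition above) =====
theorem build_tree_recursive_spec : Claim_equal_build_tree_recursive := by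
  intro data _dom hpre
  unfold Spec_build_tree_recursive build_tree_recursive build_tree_recursive_alt
  obtain ⟨hroot, hheight⟩ := hpre
  cases hr : (PySem.Dict.ofList data).get? "root" with
  | none => simp [hr] at hroot
  | some root =>
    cases hh : (PySem.Dict.ofList data).get? "height" with
    | none => rw [hh] at hheight; simp at hheight
    | some height =>
      rw [hh] at hheight
      simp only [Option.getD_some] at hheight
      simp only [hr, hh]
      have := pvExpandA_eq_foldl (height - 1).toNat height 0 [root] [[root]] (by omega)
      rw [this]
      rfl
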